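-- pv_equiv track=rewrite | github.com/snphbaum/scikit-gpuppy | skgpuppy/TaylorPropagation.py | _setpartition
-- ===== SOURCE A (Python) =====
-- from itertools import combinations
--
-- def _setpartition(iterable, n=2):
-- 	"""
-- 	Gets the pairs for Isserli's theorem
--
-- 	:param iterable: Iterable
-- 	:param n: number of elements in each set
-- 	:return:
-- 	"""
--
-- 	iterable = list(iterable)
-- 	partitions = combinations(combinations(iterable, r=n), r=len(iterable) // n)
-- 	for partition in partitions:
-- 		seen = set()
-- 		for group in partition:
-- 			if seen.intersection(group):
-- 				break
-- 			seen.update(group)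
-- 		else:
-- 			yield partition
-- ===== SOURCE B (Python) =====
-- from itertools import combinations
--
-- def _setpartition(iterable, n=2):
-- 	"""
-- 	Gets the pairs for Isserli's theorem, by recursive generation: the first
-- 	group of a partition either extends the first remaining element with an
-- 	(n-1)-combination of the rest, or the first element is skipped entirely;
-- 	clashing values are filtered out before recursing.
--
-- 	:param iterable: Iterable
-- 	:param n: number of elements in each set
-- 	:return:
-- 	"""
-- 	elems = tuple(iterable)
-- 	k = len(elems) // n
--
-- 	def gen(xs, k):
-- 		# strictly increasing tuples of k pairwise value-disjoint n-groups
-- 		# drawn from xs, in the same lexicographic order as A's enumeration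
-- 		if k == 0:
-- 			yield ()
-- 			return
-- 		if len(xs) < n:
-- 			return
-- 		head, rest = xs[0], xs[1:]
-- 		# the partitions whose first group contains xs[0] come first in lex order
-- 		for c in combinations(rest, n - 1):
-- 			g = (head,) + c
-- 			remaining = tuple(y for y in rest if y not in g)
-- 			for tail in gen(remaining, k - 1):
-- 				yield (g,) + tail
-- 		# then the partitions whose groups all avoid xs[0]
-- 		yield from gen(rest, k)
--
-- 	yield from gen(elems, k)
-- ===== Notes on version B (the rewrite author's own statement) =====
-- stated objective: alternative
-- what changed: A filters every k-combination of all n-combinations for pairwise disjointness; B generates only candidate partitions recursively (the first group extends the first remaining element or that element is skipped, clashing values removed before recursing), in the same lexicographic order.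
import Mathlib
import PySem

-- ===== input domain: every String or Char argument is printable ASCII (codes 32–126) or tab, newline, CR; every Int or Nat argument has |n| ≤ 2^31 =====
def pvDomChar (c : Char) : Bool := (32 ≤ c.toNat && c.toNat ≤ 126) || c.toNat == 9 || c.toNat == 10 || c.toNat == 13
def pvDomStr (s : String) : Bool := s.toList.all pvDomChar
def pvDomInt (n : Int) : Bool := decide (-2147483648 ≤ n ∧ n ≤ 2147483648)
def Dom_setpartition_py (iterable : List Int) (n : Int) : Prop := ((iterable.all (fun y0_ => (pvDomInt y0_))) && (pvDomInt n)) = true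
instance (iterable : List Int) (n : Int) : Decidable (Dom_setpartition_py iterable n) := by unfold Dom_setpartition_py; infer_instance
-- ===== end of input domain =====

-- B replaces A's filter over all combinations-of-combinations by recursive generation
-- (the first group extends the first remaining element, or that element is skipped), pruning
-- clashing values early. Both are generators; the equivalence proved here is about the
-- returned list of yielded partitions.

-- ===== PORT A =====

-- itertools.combinations(xs, r) in Python's lexicographic order (shared model, used by both ports)
def comb {α : Type} : List α → Nat → List (List α)
  | _, 0 => [[]]
  | [], _ + 1 => []
  | x :: xs, k + 1 => ((comb xs k).map (fun c => x :: c)) ++ comb xs (k + 1)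

-- A's inner `for group in partition: if seen.intersection(group): break; seen.update(group) / else: yield`
def okLoop : PySem.Set Int → List (List Int) → Bool
  | _, [] => true
  | seen, g :: gs =>
    if (PySem.Set.inter seen g).isEmpty then okLoop (PySem.Set.update seen g) gs else false

-- For n ≤ 0 Python raises (ValueError / ZeroDivisionError); excluded by Pre_, so n.toNat is exact on Pre_.
def setpartition_py (iterable : List Int) (n : Int) : List (List (List Int)) :=
  let groups := comb iterable n.toNat
  let partitions := comb groups ((PySem.Int.floordiv (PySem.List.len iterable) n).toNat)
  partitions.filter (fun p => okLoop PySem.Set.empty p)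

-- ===== PORT B =====

-- B's gen(xs, k): k == 0 yields (); len(xs) < n yields nothing; else the groups containing
-- xs[0] (extended with each (n-1)-combination of the rest, remaining values filtered), then
-- the partitions avoiding xs[0].  (For xs = [] the `len(xs) < n` guard returns [] when n ≥ 1.)
def genB (m : Nat) : List Int → Nat → List (List (List Int))
  | _, 0 => [[]]
  | [], _ + 1 => []
  | x :: rest, k + 1 =>
    if (x :: rest).length < m then []
    else
      ((comb rest (m - 1)).flatMap (fun c =>
        (genB m (rest.filter (fun y => !(x :: c).contains y)) k).map (fun t => (x :: c) :: t)))
      ++ genB m rest (k + 1)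
termination_by xs k => (k, xs.length)
decreasing_by
· exact Prod.Lex.left _ _ (Nat.lt_succ_self k)
· exact Prod.Lex.right _ (Nat.lt_succ_self rest.length)

def setpartition_py_alt (iterable : List Int) (n : Int) : List (List (List Int)) :=
  genB n.toNat iterable ((PySem.Int.floordiv (PySem.List.len iterable) n).toNat)

-- ===== PRECONDITION & SPEC =====

-- Pre_ excludes exactly n ≤ 0, where A raises (ValueError from combinations for n < 0,
-- ZeroDivisionError from len(iterable) // n for n = 0); B raises there too.
def Pre_setpartition_py (iterable : List Int) (n : Int) : Prop := 1 ≤ n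
instance (iterable : List Int) (n : Int) : Decidable (Pre_setpartition_py iterable n) := by
  unfold Pre_setpartition_py; infer_instance

def pvWitness_setpartition_py : List Int × Int := ([1, 2, 3, 4], 2)

def Spec_setpartition_py (iterable : List Int) (n : Int) (out : List (List (List Int))) : Prop := out = setpartition_py_alt iterable n
instance (iterable : List Int) (n : Int) (out : List (List (List Int))) : Decidable (Spec_setpartition_py iterable n out) := by unfold Spec_setpartition_py; infer_instance

-- ===== CLAIM (what is proved, stated in full; the proofs are below) =====
def Claim_equal_setpartition_py : Prop := ∀ (iterable : List Int) (n : Int), Dom_setpartition_py iterable n → Pre_setpartition_py iterable n → Spec_setpartition_py iterable n (setpartition_py iterable n)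

-- ===== LEMMAS AND PROOFS =====

-- `avq q g` : no element of g satisfies q (g "avoids" the seen-set membership predicate q)
def avq (q : Int → Bool) (g : List Int) : Bool := g.all (fun y => !q y)

-- groups pairwise value-disjoint
def pdisj : List (List Int) → Bool
  | [] => true
  | g :: gs => gs.all (fun h => avq (fun y => g.contains y) h) && pdisj gs

-- the canonical predicate of A's inner loop: all groups avoid q, and are pairwise disjoint
def PP (q : Int → Bool) (p : List (List Int)) : Bool := p.all (avq q) && pdisj p

lemma isEmpty_filter {α : Type} (p : α → Bool) (l : List α) :
    (l.filter p).isEmpty = l.all (fun x => !p x) := by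
  induction l with
  | nil => rfl
  | cons x xs ih => by_cases h : p x <;> simp [h, ih]
lemma contains_update (s : PySem.Set Int) (g : List Int) (y : Int) :
    List.contains (PySem.Set.update s g) y = (List.contains s y || g.contains y) := by
  induction g generalizing s with
  | nil => simp [PySem.Set.update]
  | cons a as ih =>
    simp only [PySem.Set.update, List.foldl_cons] at *
    rw [ih]
    by_cases h : y = a <;> by_cases hs : a ∈ s <;> simp [PySem.Set.add, h, hs]
lemma avq_or (q r : Int → Bool) (h : List Int) :
    avq (fun y => q y || r y) h = (avq q h && avq r h) := by
  induction h with
  | nil => rfl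
  | cons a as ih =>
    simp only [avq, List.all_cons] at *
    rw [ih]
    cases q a <;> cases r a <;> simp
lemma avq_comm (a b : List Int) :
    avq (fun y => a.contains y) b = avq (fun y => b.contains y) a := by
  rw [Bool.eq_iff_iff]
  simp [avq, List.all_eq_true]
  tauto
lemma PP_cons (q : Int → Bool) (g : List Int) (t : List (List Int)) :
    PP q (g :: t) = (avq q g && PP (fun y => q y || g.contains y) t) := by
  simp only [PP, pdisj, List.all_cons]
  have h : t.all (avq fun y => q y || g.contains y) = (t.all (avq q) && t.all (avq fun y => g.contains y)) := by
    induction t with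
    | nil => rfl
    | cons b bs ih => simp only [List.all_cons, ih, avq_or]; cases avq q b <;> cases avq (fun y => g.contains y) b <;> simp
  rw [h]
  cases avq q g <;> cases t.all (avq q) <;> cases t.all (avq fun y => g.contains y) <;> cases pdisj t <;> simp

lemma okLoop_eq (gs : List (List Int)) : ∀ s : PySem.Set Int,
    okLoop s gs = PP (fun y => List.contains s y) gs := by
  induction gs with
  | nil => intro s; rfl
  | cons g gs ih =>
    intro s
    have hcond : (PySem.Set.inter s g).isEmpty = avq (fun y => g.contains y) s := by
      simp [PySem.Set.inter, isEmpty_filter, avq]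
    rw [okLoop, hcond, PP_cons, avq_comm s g]
    by_cases h : avq (fun y => g.contains y) s = true
    · rw [if_pos h, h, Bool.true_and, ih]
      congr 1
      funext y
      rw [contains_update]
    · rw [if_neg h]
      rw [Bool.not_eq_true] at h
      rw [h, Bool.false_and]

lemma comb_nil_of_lt {α : Type} : ∀ (xs : List α) (k : Nat), xs.length < k → comb xs k = [] := by
  intro xs
  induction xs with
  | nil => intro k hk; cases k with | zero => omega | succ k => rfl
  | cons x xs ih =>
    intro k hk
    cases k with
    | zero => omega
    | succ k =>
      simp only [comb]
      rw [ih k (by simpa using hk), ih (k+1) (by simp at hk; omega)]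
      rfl

lemma comb_filter {α : Type} (p : α → Bool) :
    ∀ (xs : List α) (k : Nat), comb (xs.filter p) k = (comb xs k).filter (fun c => c.all p) := by
  intro xs
  induction xs with
  | nil => intro k; cases k <;> rfl
  | cons x xs ih =>
    intro k
    cases k with
    | zero => simp [comb]
    | succ k =>
      by_cases h : p x
      · simp only [List.filter_cons, h, if_pos, comb, ih, List.filter_append, List.filter_map]
        congr 1
        · congr 1
          apply List.filter_congr
          intro c _
          simp [Function.comp, h]
      · rw [List.filter_cons_of_neg h, ih, comb, List.filter_append]
        have : (List.filter (fun c => c.all p) ((comb xs k).map (fun c => x :: c))) = [] := by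
          rw [List.filter_map]
          have : (List.filter ((fun c => c.all p) ∘ (fun c => x :: c)) (comb xs k)) = [] := by
            apply List.filter_eq_nil_iff.mpr
            intro c _
            simp [Function.comp, h]
          rw [this]; rfl
        rw [this]; rfl

lemma avq_false (h : List Int) : avq (fun _ => false) h = true := by simp [avq]

lemma F_cons (q : Int → Bool) (g : List Int) (M : List (List Int)) (k : Nat) :
    (comb (g :: M) (k + 1)).filter (PP q) =
      (if avq q g then ((comb M k).filter (PP (fun y => q y || g.contains y))).map (fun t => g :: t) else [])
        ++ (comb M (k + 1)).filter (PP q) := by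
  rw [comb, List.filter_append, List.filter_map]
  congr 1
  by_cases h : avq q g = true
  · rw [if_pos h]
    rw [show ((PP q) ∘ (fun t => g :: t)) = PP (fun y => q y || g.contains y) from ?_]
    · funext t
      simp [Function.comp, PP_cons, h]
  · rw [if_neg h]
    rw [Bool.not_eq_true] at h
    have : List.filter ((PP q) ∘ (fun t => g :: t)) (comb M k) = [] := by
      apply List.filter_eq_nil_iff.mpr
      intro c _
      simp [Function.comp, PP_cons, h]
    rw [this]
    rfl

lemma F_elim (q : Int → Bool) (x : Int) (hx : q x = true) (B : List (List Int)) :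
    ∀ (cs : List (List Int)) (k : Nat),
      (comb (cs.map (fun c => x :: c) ++ B) k).filter (PP q) = (comb B k).filter (PP q) := by
  intro cs
  induction cs with
  | nil => intro k; rfl
  | cons c cs ih =>
    intro k
    cases k with
    | zero => simp [comb]
    | succ k =>
      rw [List.map_cons, List.cons_append, F_cons]
      have hav : avq q (x :: c) = false := by simp [avq, hx]
      rw [hav]
      simp only [Bool.false_eq_true, if_false, List.nil_append]
      exact ih (k + 1)

lemma F_inner (x : Int) (B : List (List Int)) :
    ∀ (cs : List (List Int)) (k : Nat),
      (comb (cs.map (fun c => x :: c) ++ B) (k + 1)).filter (PP (fun _ => false)) =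
        cs.flatMap (fun c =>
          ((comb B k).filter (PP (fun y => (x :: c).contains y))).map (fun t => (x :: c) :: t))
        ++ (comb B (k + 1)).filter (PP (fun _ => false)) := by
  intro cs
  induction cs with
  | nil => intro k; rfl
  | cons c cs ih =>
    intro k
    rw [List.map_cons, List.cons_append, F_cons]
    have hav : avq (fun _ => false) (x :: c) = true := avq_false _
    rw [hav, if_pos rfl]
    have hq : (fun y => (false || (x :: c).contains y)) = (fun y => (x :: c).contains y) := by
      funext y; simp
    rw [hq]
    rw [F_elim (fun y => (x :: c).contains y) x (by simp) B cs k]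
    rw [ih (k)]
    simp [List.flatMap_cons, List.append_assoc]

lemma F_push (g : List Int) (rest : List Int) (m k : Nat) :
    (comb (comb rest m) k).filter (PP (fun y => g.contains y)) =
      (comb (comb (rest.filter (fun y => !g.contains y)) m) k).filter (PP (fun _ => false)) := by
  rw [comb_filter (fun y => !g.contains y) rest m,
      comb_filter (fun c => c.all (fun y => !g.contains y)) (comb rest m) k,
      List.filter_filter]
  apply List.filter_congr
  intro p _
  have h1 : p.all (avq (fun _ => false)) = true := by
    apply List.all_eq_true.mpr; intro c _; simp [avq]
  have h2 : (avq (fun y => g.contains y)) = (fun c : List Int => c.all (fun y => !g.contains y)) := rfl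
  simp only [PP, h1, h2, Bool.true_and]
  cases pdisj p <;> cases p.all (fun c : List Int => c.all (fun y => !g.contains y)) <;> simp

lemma main_lemma (m : Nat) (hm : 1 ≤ m) :
    ∀ (N : Nat) (xs : List Int) (k : Nat), xs.length ≤ N →
      (comb (comb xs m) k).filter (PP (fun _ => false)) = genB m xs k := by
  intro N
  induction N with
  | zero =>
    intro xs k h
    have hxs : xs = [] := by cases xs with | nil => rfl | cons a l => simp at h
    subst hxs
    cases k with
    | zero => simp [comb, genB, PP, pdisj]
    | succ k =>
      obtain ⟨mm, rfl⟩ : ∃ mm, m = mm + 1 := ⟨m - 1, by omega⟩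
      simp [comb, genB]
  | succ N ih =>
    intro xs k h
    cases k with
    | zero => simp [comb, genB, PP, pdisj]
    | succ k =>
      by_cases hlt : xs.length < m
      · rw [comb_nil_of_lt xs m hlt]
        cases xs with
        | nil => simp [comb, genB]
        | cons x rest =>
          rw [genB, if_pos hlt]
          simp [comb]
      · obtain ⟨x, rest, rfl⟩ : ∃ x rest, xs = x :: rest := by
          cases xs with
          | nil => exact absurd (by simpa using hm) (by simp at hlt; omega)
          | cons a l => exact ⟨a, l, rfl⟩
        obtain ⟨mm, rfl⟩ : ∃ mm, m = mm + 1 := ⟨m - 1, by omega⟩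
        rw [show comb (x :: rest) (mm + 1) = ((comb rest mm).map (fun c => x :: c)) ++ comb rest (mm + 1) from rfl]
        rw [F_inner x (comb rest (mm + 1)) (comb rest mm) k]
        rw [genB, if_neg hlt]
        have hrest : rest.length ≤ N := by simp at h; omega
        congr 1
        · simp only [Nat.add_sub_cancel]
          congr 1
          funext c
          rw [F_push (x :: c) rest (mm + 1) k]
          rw [ih (rest.filter (fun y => !(x :: c).contains y)) k
              (le_trans (List.length_filter_le _ _) hrest)]
        · exact ih rest (k + 1) hrest

-- ===== VERDICT (by name: the statement is the Claim_ definition above) =====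
theorem setpartition_py_spec : Claim_equal_setpartition_py := by
  intro iterable n _ hpre
  unfold Spec_setpartition_py setpartition_py setpartition_py_alt
  have hm : 1 ≤ n.toNat := by
    unfold Pre_setpartition_py at hpre; omega
  have h1 : (fun p => okLoop PySem.Set.empty p) = PP (fun _ => false) := by
    funext p
    rw [okLoop_eq]
    rfl
  simp only [h1]
  exact main_lemma n.toNat hm iterable.length iterable _ le_rfl
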